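-- pv_equiv track=rewrite | github.com/franciscobecheli/MLT-3 | main.py | mlt3_encode
-- ===== SOURCE A (Python) =====
-- def mlt3_encode(data):
--     encrypted_string = ""
--     previous_bit = "1"
--
--     for bit in data:
--         if bit == "0":
--             encrypted_string += previous_bit
--         else:
--             encrypted_string += "0" if previous_bit == "1" else "1"
--
--         previous_bit = encrypted_string[-1]
--
--     return encrypted_string
-- ===== SOURCE B (Python) =====
-- def mlt3_encode(data):
--     # Run-length strategy: count consecutive '0's; when a toggle character arrives,
--     # flush the buffered run as one repeated piece, flip the level, emit it; join once.
--     pieces = []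
--     cur = "1"
--     run = 0
--     for c in data:
--         if c == "0":
--             run += 1
--         else:
--             pieces.append(cur * run)
--             cur = "0" if cur == "1" else "1"
--             pieces.append(cur)
--             run = 0
--     pieces.append(cur * run)
--     return "".join(pieces)
-- ===== Notes on version B (the rewrite author's own statement) =====
-- stated objective: alternative
-- what changed: B is a run-length encoder: it buffers consecutive '0' inputs as a counter, on each toggle character flushes the whole run as one repeated-character piece, flips the level and emits it, and joins all pieces once, instead of A's per-character emission driven by re-reading the last character of the growing output string.
import Mathlib
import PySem

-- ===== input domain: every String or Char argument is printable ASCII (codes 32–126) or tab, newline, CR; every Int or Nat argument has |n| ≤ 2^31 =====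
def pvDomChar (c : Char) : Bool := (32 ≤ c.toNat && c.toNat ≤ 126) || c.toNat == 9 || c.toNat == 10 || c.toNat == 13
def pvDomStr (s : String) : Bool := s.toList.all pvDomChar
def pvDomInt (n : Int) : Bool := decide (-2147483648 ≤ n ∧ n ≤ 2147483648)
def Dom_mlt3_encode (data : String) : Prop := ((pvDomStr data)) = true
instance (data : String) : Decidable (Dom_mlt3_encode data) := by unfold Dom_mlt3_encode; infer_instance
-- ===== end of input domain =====

-- B re-implements the encoder as a run-length scheme (buffer zero-runs, flush whole runs
-- on each toggle, join once) instead of A's per-character emission keyed on the last output char.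

-- ===== PORT A =====
-- A's loop state: the emitted string so far and previous_bit (the last emitted char, seed '1');
-- encrypted_string[-1] is ported by PySem.List.pyGet? … (-1) (always in range after the append).
def mlt3_encodeStepA (st : List Char × Char) (bit : Char) : List Char × Char :=
  let enc := if bit == '0' then st.1 ++ [st.2]
             else st.1 ++ [if st.2 == '1' then '0' else '1']
  (enc, (PySem.List.pyGet? enc (-1)).getD st.2)

def mlt3_encode (data : String) : String :=
  String.mk (data.toList.foldl mlt3_encodeStepA ([], '1')).1

-- ===== PORT B =====
-- B's loop state: flushed pieces (flattened), current level char, length of the pending zero-run.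
def mlt3_encodeStepB (st : List Char × Char × Nat) (c : Char) : List Char × Char × Nat :=
  if c == '0' then (st.1, st.2.1, st.2.2 + 1)
  else
    let cur := if st.2.1 == '1' then '0' else '1'
    (st.1 ++ List.replicate st.2.2 st.2.1 ++ [cur], cur, 0)

def mlt3_encode_alt (data : String) : String :=
  let st := data.toList.foldl mlt3_encodeStepB ([], '1', 0)
  String.mk (st.1 ++ List.replicate st.2.2 st.2.1)

-- ===== PRECONDITION & SPEC =====
def Spec_mlt3_encode (data : String) (out : String) : Prop := out = mlt3_encode_alt data
instance (data : String) (out : String) : Decidable (Spec_mlt3_encode data out) := by unfold Spec_mlt3_encode; infer_instance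

-- ===== CLAIM (what is proved, stated in full; the proofs are below) =====
def Claim_equal_mlt3_encode : Prop := ∀ (data : String), Dom_mlt3_encode data → Spec_mlt3_encode data (mlt3_encode data)

-- ===== LEMMAS AND PROOFS =====
-- Invariant: A's state after any prefix is (B.pieces ++ replicate B.run B.cur, B.cur).
theorem mlt3_fold_eq (l : List Char) : ∀ (out : List Char) (cur : Char) (run : Nat),
    (cur = '0' ∨ cur = '1') →
    l.foldl mlt3_encodeStepA (out ++ List.replicate run cur, cur)
      = ((l.foldl mlt3_encodeStepB (out, cur, run)).1
           ++ List.replicate (l.foldl mlt3_encodeStepB (out, cur, run)).2.2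
                (l.foldl mlt3_encodeStepB (out, cur, run)).2.1,
         (l.foldl mlt3_encodeStepB (out, cur, run)).2.1) := by
  induction l with
  | nil => intro out cur run _; simp
  | cons c rest ih =>
    intro out cur run hcur
    by_cases hc : c = '0'
    · have hA : mlt3_encodeStepA (out ++ List.replicate run cur, cur) c
          = (out ++ List.replicate (run + 1) cur, cur) := by
        simp [mlt3_encodeStepA, hc, List.replicate_succ' (n := run),
              PySem.List.pyGet?_neg_one, List.getLast?_append]
      have hB : mlt3_encodeStepB (out, cur, run) c = (out, cur, run + 1) := by
        simp [mlt3_encodeStepB, hc]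
      simp only [List.foldl_cons, hA, hB]
      exact ih out cur (run + 1) hcur
    · have hflip : (if cur == '1' then '0' else '1') = '0' ∨
          (if cur == '1' then '0' else '1') = '1' := by
        rcases hcur with h | h <;> simp [h]
      have hA : mlt3_encodeStepA (out ++ List.replicate run cur, cur) c
          = ((out ++ List.replicate run cur ++ [if cur == '1' then '0' else '1'])
               ++ List.replicate 0 (if cur == '1' then '0' else '1'),
             (if cur == '1' then '0' else '1')) := by
        simp [mlt3_encodeStepA, hc, PySem.List.pyGet?_neg_one, List.getLast?_append]
      have hB : mlt3_encodeStepB (out, cur, run) c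
          = (out ++ List.replicate run cur ++ [if cur == '1' then '0' else '1'],
             (if cur == '1' then '0' else '1'), 0) := by
        simp [mlt3_encodeStepB, hc]
      simp only [List.foldl_cons, hA, hB]
      exact ih _ _ 0 hflip

-- ===== VERDICT (by name: the statement is the Claim_ definition above) =====
theorem mlt3_encode_spec : Claim_equal_mlt3_encode := by
  intro data _
  show String.mk _ = _
  simp only [mlt3_encode_alt]
  have h := mlt3_fold_eq data.toList [] '1' 0 (Or.inr rfl)
  simp only [List.replicate, List.append_nil] at h
  rw [h]
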